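-- pv_equiv track=rewrite | github.com/gui549/LeetCode-Solutions | Python/Medium/1536.MinimumSwapstoArrangeaBinaryGrid.py | minSwaps
-- ===== SOURCE A (Python) =====
-- from typing import List
--
-- def minSwaps(grid: List[List[int]]) -> int:
--     def countZero(list):
--         count = 0
--         for i in list[::-1]:
--             if i == 1: break
--             count += 1
--         return count
--
--     zeroCount = [countZero(g) for g in grid]
--
--     n, answer = len(grid), 0
--     for i in range(n):
--         found = False
--         for j in range(len(zeroCount)):
--             if n - 1 - i <= zeroCount[j]:
--                 answer += j
--                 zeroCount.pop(j)
--                 found= True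
--                 break
--         if not found:
--             return -1
--
--     return answer
-- ===== SOURCE B (Python) =====
-- def minSwaps(grid):
--     n = len(grid)
--     zc = []
--     for row in grid:
--         c = 0
--         k = len(row) - 1
--         while k >= 0 and row[k] != 1:
--             c += 1
--             k -= 1
--         zc.append(c)
--     # pick, for each required trailing-zero count n-1, n-2, ..., 0, the
--     # lowest ORIGINAL row index that qualifies and is still unpicked
--     used = [False] * n
--     picks = []
--     for t in range(n - 1, -1, -1):
--         choice = -1
--         for idx in range(n):
--             if not used[idx] and zc[idx] >= t:
--                 choice = idx
--                 break
--         if choice < 0: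
--             return -1
--         used[choice] = True
--         picks.append(choice)
--     # the swap count is the number of inversions of the pick sequence
--     return sum(1 for a in range(n) for b in range(a + 1, n) if picks[a] > picks[b])
-- ===== Notes on version B (the rewrite author's own statement) =====
-- stated objective: alternative
-- what changed: B never mutates the count list: it selects, per required threshold, the lowest still-unpicked original row index via a used-flag scan, records the pick sequence, and returns its inversion count, whereas A pops rows from a shrinking list and accumulates the pop positions.
import Mathlib
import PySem

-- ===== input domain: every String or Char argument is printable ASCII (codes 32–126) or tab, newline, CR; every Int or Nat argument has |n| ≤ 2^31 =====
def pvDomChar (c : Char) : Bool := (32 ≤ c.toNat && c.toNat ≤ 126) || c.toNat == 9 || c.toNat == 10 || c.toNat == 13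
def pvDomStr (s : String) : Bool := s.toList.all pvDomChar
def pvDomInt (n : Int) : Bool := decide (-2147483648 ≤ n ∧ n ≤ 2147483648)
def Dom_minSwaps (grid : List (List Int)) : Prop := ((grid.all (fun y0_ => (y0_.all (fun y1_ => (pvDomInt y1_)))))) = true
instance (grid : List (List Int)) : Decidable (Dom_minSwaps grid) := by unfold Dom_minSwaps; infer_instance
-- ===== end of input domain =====

-- B computes the pick sequence with used-flags over the untouched count list and returns
-- its inversion count, instead of A's pop-from-a-shrinking-list with accumulated pop
-- positions; alternative decomposition, same asymptotic cost.

-- ===== PORT A =====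
-- countZero: count = 0; for i in list[::-1]: if i == 1: break; count += 1
def countZeroGoA : List Int → Int → Int
  | [], c => c
  | i :: rest, c => if i = 1 then c else countZeroGoA rest (c + 1)

def countZeroA (l : List Int) : Int :=
  countZeroGoA ((PySem.List.slice? l none none (-1)).getD []) 0

-- inner loop: first j with need ≤ zeroCount[j]; returns (j, zeroCount with j popped)
def innerA (need : Int) : List Int → Option (Nat × List Int)
  | [] => none
  | z :: zs =>
    if need ≤ z then some (0, zs)
    else (innerA need zs).map (fun p => (p.1 + 1, z :: p.2))

-- outer loop over the successive needs n-1-i; -1 on failure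
def outerA : List Int → List Int → Int → Int
  | [], _, ans => ans
  | need :: rest, zc, ans =>
    match innerA need zc with
    | some (j, zc') => outerA rest zc' (ans + (j : Int))
    | none => -1

def minSwaps (grid : List (List Int)) : Int :=
  let zeroCount := grid.map countZeroA
  let n := grid.length
  outerA ((List.range n).map (fun i : Nat => (n : Int) - 1 - (i : Int))) zeroCount 0

-- ===== PORT B =====
-- while k >= 0 and row[k] != 1: walk from the end = recursion over the reversed row
def trailGoB : List Int → Int
  | [] => 0
  | x :: xs => if x ≠ 1 then 1 + trailGoB xs else 0

def zcB (row : List Int) : Int := trailGoB row.reverse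

-- first still-unused index idx with t ≤ zc[idx]
def findB (t : Int) : List Int → List Bool → Option Nat
  | z :: zs, u :: us => if (!u) && t ≤ z then some 0 else (findB t zs us).map (· + 1)
  | _, _ => none

-- for t = n-1, ..., 0 pick the first unused qualifying index
def pickB : List Int → List Int → List Bool → Option (List Nat)
  | [], _, _ => some []
  | t :: ts, zc, used =>
    match findB t zc used with
    | none => none
    | some c => (pickB ts zc (used.set c true)).map (fun rest => c :: rest)

-- sum(1 for a ... for b in later ... if picks[a] > picks[b])
def invB : List Nat → Int
  | [] => 0
  | a :: rest => ((rest.filter (fun b => decide (b < a))).length : Int) + invB rest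

def minSwaps_alt (grid : List (List Int)) : Int :=
  let n := grid.length
  let zc := grid.map zcB
  match pickB ((List.range n).map (fun i : Nat => (n : Int) - 1 - (i : Int))) zc
      (List.replicate n false) with
  | none => -1
  | some p => invB p

-- ===== PRECONDITION & SPEC =====
def Spec_minSwaps (grid : List (List Int)) (out : Int) : Prop := out = minSwaps_alt grid
instance (grid : List (List Int)) (out : Int) : Decidable (Spec_minSwaps grid out) := by unfold Spec_minSwaps; infer_instance

-- ===== CLAIM (what is proved, stated in full; the proofs are below) =====
def Claim_equal_minSwaps : Prop := ∀ (grid : List (List Int)), Dom_minSwaps grid → Spec_minSwaps grid (minSwaps grid)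

-- ===== LEMMAS AND PROOFS =====

-- A's live zeroCount list = original counts at still-unused positions
def maskF : List Int → List Bool → List Int
  | z :: zs, u :: us => if u then maskF zs us else z :: maskF zs us
  | _, _ => []

-- positions of the false flags
def fpos : List Bool → List Nat
  | [] => []
  | b :: bs => (if b then [] else [0]) ++ (fpos bs).map (· + 1)

lemma ctzGo_eq (l : List Int) : ∀ c : Int, countZeroGoA l c = c + trailGoB l := by
  induction l with
  | nil => intro c; simp [countZeroGoA, trailGoB]
  | cons x xs ih =>
    intro c
    by_cases h : x = 1 <;> simp [countZeroGoA, trailGoB, h, ih] <;> ring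

lemma cz_eq (l : List Int) : countZeroA l = zcB l := by
  rw [countZeroA, zcB, PySem.List.slice?_none_none_neg_one, Option.getD_some, ctzGo_eq]
  ring

lemma inner_find (need : Int) : ∀ (zc : List Int) (us : List Bool),
    innerA need (maskF zc us) =
      (findB need zc us).map (fun c => ((us.take c).count false, maskF zc (us.set c true))) := by
  intro zc
  induction zc with
  | nil => intro us; cases us <;> simp [maskF, innerA, findB]
  | cons z zs ih =>
    intro us
    cases us with
    | nil => simp [maskF, innerA, findB]
    | cons u us' =>
      cases u with
      | true =>
        have hm : maskF (z :: zs) (true :: us') = maskF zs us' := by simp [maskF]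
        rw [hm, ih us']
        cases h : findB need zs us' with
        | none => simp [findB, h]
        | some c => simp [findB, h, maskF, List.count_cons]
      | false =>
        by_cases hz : need ≤ z
        · simp [maskF, innerA, findB, hz]
        · have hm : maskF (z :: zs) (false :: us') = z :: maskF zs us' := by simp [maskF]
          rw [hm]
          simp only [innerA, if_neg hz, ih us']
          cases h : findB need zs us' with
          | none => simp [findB, h, hz]
          | some c => simp [findB, h, hz, maskF, List.count_cons]

lemma find_getD (t : Int) : ∀ (zc : List Int) (us : List Bool) (c : Nat),
    findB t zc us = some c → us.getD c true = false := by
  intro zc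
  induction zc with
  | nil => intro us c h; cases us <;> simp [findB] at h
  | cons z zs ih =>
    intro us c h
    cases us with
    | nil => simp [findB] at h
    | cons u us' =>
      by_cases hc : (!u) && t ≤ z
      · simp [findB, hc] at h
        subst h
        revert hc; cases u <;> simp
      · simp [findB, hc] at h
        obtain ⟨c', hc', rfl⟩ := h
        simpa using ih us' c' hc'

lemma fpos_perm : ∀ (us : List Bool) (c : Nat), us.getD c true = false →
    List.Perm (fpos us) (c :: fpos (us.set c true)) := by
  intro us
  induction us with
  | nil => intro c h; simp at h
  | cons b bs ih =>
    intro c h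
    cases c with
    | zero =>
      simp at h; subst h
      simp [fpos]
    | succ c' =>
      simp at h
      have hperm := ih c' h
      have : List.Perm ((fpos bs).map (· + 1)) ((c' + 1) :: (fpos (bs.set c' true)).map (· + 1)) := by
        simpa using hperm.map (· + 1)
      cases b with
      | true =>
        simpa [fpos] using this
      | false =>
        have hgoal : List.Perm ([0] ++ (fpos bs).map (· + 1))
            ((c' + 1) :: ([0] ++ (fpos (bs.set c' true)).map (· + 1))) :=
          (this.append_left [0]).trans List.perm_middle
        simpa [fpos] using hgoal

lemma fpos_length : ∀ us : List Bool, (fpos us).length = us.count false := by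
  intro us
  induction us with
  | nil => simp [fpos]
  | cons b bs ih =>
    cases b <;> simp [fpos, ih, List.count_cons]

lemma take_count_filter : ∀ (us : List Bool) (c : Nat),
    (us.take c).count false = ((fpos us).filter (fun b => decide (b < c))).length := by
  intro us
  induction us with
  | nil => intro c; simp [fpos]
  | cons b bs ih =>
    intro c
    cases c with
    | zero => simp [fpos]
    | succ c' =>
      have hmap : ((fpos bs).map (· + 1)).filter (fun b => decide (b < c' + 1))
          = ((fpos bs).filter (fun b => decide (b < c'))).map (· + 1) := by
        rw [List.filter_map]
        congr 1
        apply List.filter_congr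
        intro x _
        simp [Nat.succ_lt_succ_iff]
      simp only [fpos, List.filter_append, List.length_append, hmap]
      cases b <;> simp [List.count_cons, ih c'] <;> omega

lemma picks_perm : ∀ (ts : List Int) (zc : List Int) (us : List Bool) (p : List Nat),
    pickB ts zc us = some p → ts.length = us.count false → List.Perm p (fpos us) := by
  intro ts
  induction ts with
  | nil =>
    intro zc us p hp hlen
    simp [pickB] at hp; subst hp
    simp only [List.length_nil] at hlen
    have : (fpos us).length = 0 := by rw [fpos_length]; omega
    simp [List.length_eq_zero_iff.mp this]
  | cons t ts' ih =>
    intro zc us p hp hlen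
    simp only [pickB] at hp
    cases hf : findB t zc us with
    | none => rw [hf] at hp; simp at hp
    | some c =>
      rw [hf] at hp
      simp only [Option.map_eq_some_iff] at hp
      obtain ⟨rest, hrest, rfl⟩ := hp
      have hget := find_getD t zc us c hf
      have hperm := fpos_perm us c hget
      have hcount : us.count false = (us.set c true).count false + 1 := by
        have h1 := fpos_length us
        have h2 := fpos_length (us.set c true)
        have := hperm.length_eq
        simp at this
        omega
      have hrest' := ih zc (us.set c true) rest hrest (by simp at hlen ⊢; omega)
      exact (hrest'.cons c).trans hperm.symm

lemma outer_eq : ∀ (ts : List Int) (zc : List Int) (us : List Bool) (ans : Int),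
    ts.length = us.count false →
    outerA ts (maskF zc us) ans =
      (match pickB ts zc us with
       | none => -1
       | some p => ans + invB p) := by
  intro ts
  induction ts with
  | nil => intro zc us ans _; simp [outerA, pickB, invB]
  | cons t ts' ih =>
    intro zc us ans hlen
    simp only [outerA, inner_find, pickB]
    cases hf : findB t zc us with
    | none => simp
    | some c =>
      simp only [Option.map_some]
      have hget := find_getD t zc us c hf
      have hperm := fpos_perm us c hget
      have hcount : us.count false = (us.set c true).count false + 1 := by
        have h1 := fpos_length us
        have h2 := fpos_length (us.set c true)
        have := hperm.length_eq
        simp at this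
        omega
      rw [ih zc (us.set c true) (ans + ((us.take c).count false : Int))
            (by simp at hlen ⊢; omega)]
      cases hp : pickB ts' zc (us.set c true) with
      | none => simp
      | some rest =>
        simp only [Option.map_some, invB]
        have hrest := picks_perm ts' zc (us.set c true) rest hp
          (by simp at hlen ⊢; omega)
        have hfilter : (rest.filter (fun b => decide (b < c))).length
            = ((fpos (us.set c true)).filter (fun b => decide (b < c))).length :=
          (hrest.filter _).length_eq
        have hj : (us.take c).count false = (rest.filter (fun b => decide (b < c))).length := by
          rw [take_count_filter us c, hfilter]
          have : ((c :: fpos (us.set c true)).filter (fun b => decide (b < c))).length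
              = ((fpos (us.set c true)).filter (fun b => decide (b < c))).length := by
            simp [List.filter_cons]
          rw [← this, ← ((fpos_perm us c hget).filter _).length_eq]
        rw [hj]; ring

lemma mask_replicate : ∀ zc : List Int, maskF zc (List.replicate zc.length false) = zc := by
  intro zc
  induction zc with
  | nil => simp [maskF]
  | cons z zs ih => simpa [maskF, List.replicate_succ] using ih

-- ===== VERDICT (by name: the statement is the Claim_ definition above) =====
theorem minSwaps_spec : Claim_equal_minSwaps := by
  intro grid _
  show minSwaps grid = minSwaps_alt grid
  have hmapeq : grid.map countZeroA = grid.map zcB :=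
    List.map_congr_left (fun l _ => cz_eq l)
  have hlen : (grid.map zcB).length = grid.length := by simp
  have h1 : ((List.range grid.length).map
        (fun i : Nat => (grid.length : Int) - 1 - (i : Int))).length
      = (List.replicate grid.length false).count false := by simp
  have h2 := outer_eq
    ((List.range grid.length).map (fun i : Nat => (grid.length : Int) - 1 - (i : Int)))
    (grid.map zcB) (List.replicate grid.length false) 0 h1
  rw [← hlen, mask_replicate, hlen] at h2
  simp only [minSwaps, minSwaps_alt]
  rw [hmapeq, h2]
  generalize pickB
      ((List.range grid.length).map (fun i : Nat => (grid.length : Int) - 1 - (i : Int)))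
      (grid.map zcB) (List.replicate grid.length false) = r
  cases r <;> simp
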